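-- pv_equiv track=rewrite | github.com/akileshthuniki/PreApply | src/preapply/analysis/risk_reasons.py | generate_critical_risk_reason
-- ===== SOURCE A (Python) =====
-- def generate_critical_risk_reason(resource_type: str) -> str:
--     """Generate risk reason for critical infrastructure (non-shared)."""
--     resource_type_lower = resource_type.lower()
--
--     if "vpc" in resource_type_lower:
--         return "Core networking infrastructure"
--
--     if "nat" in resource_type_lower or "gateway" in resource_type_lower:
--         return "Internet egress for private workloads"
--
--     if any(x in resource_type_lower for x in ["lb", "alb", "nlb", "elb"]):
--         return "Traffic routing point"
--
--     if "security_group" in resource_type_lower or "firewall" in resource_type_lower: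
--         return "Access control enforcement"
--
--     if "db_instance" in resource_type_lower or "database" in resource_type_lower:
--         return "Data persistence - deletion causes data loss"
--     if "s3_bucket" in resource_type_lower:
--         return "Object storage - deletion causes data loss"
--
--     return "Critical infrastructure component"
-- ===== SOURCE B (Python) =====
-- # Single left-to-right scan: at each position, test which keyword starts there
-- # and keep the minimum-priority hit; "alb"/"nlb"/"elb" contain "lb", so the
-- # single "lb" entry covers them.
-- KEYWORD_PRIORITY = {
--     "vpc": 0,
--     "nat": 1, "gateway": 1,
--     "lb": 2,
--     "security_group": 3, "firewall": 3,
--     "db_instance": 4, "database": 4,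
--     "s3_bucket": 5,
-- }
-- REASONS = [
--     "Core networking infrastructure",
--     "Internet egress for private workloads",
--     "Traffic routing point",
--     "Access control enforcement",
--     "Data persistence - deletion causes data loss",
--     "Object storage - deletion causes data loss",
--     "Critical infrastructure component",
-- ]
--
-- def generate_critical_risk_reason(resource_type: str) -> str:
--     s = resource_type.lower()
--     best = 6
--     while s:
--         for k, p in KEYWORD_PRIORITY.items():
--             if p < best and s.startswith(k):
--                 best = p
--         s = s[1:]
--     return REASONS[best]
-- ===== Notes on version B (the rewrite author's own statement) =====
-- stated objective: alternative
-- what changed: Instead of six ordered independent substring searches, B makes one left-to-right scan of the lowered string, testing at each position which keyword starts there (a keyword->priority map) and keeping the minimum priority seen, then indexes a reason table.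
import Mathlib
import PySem

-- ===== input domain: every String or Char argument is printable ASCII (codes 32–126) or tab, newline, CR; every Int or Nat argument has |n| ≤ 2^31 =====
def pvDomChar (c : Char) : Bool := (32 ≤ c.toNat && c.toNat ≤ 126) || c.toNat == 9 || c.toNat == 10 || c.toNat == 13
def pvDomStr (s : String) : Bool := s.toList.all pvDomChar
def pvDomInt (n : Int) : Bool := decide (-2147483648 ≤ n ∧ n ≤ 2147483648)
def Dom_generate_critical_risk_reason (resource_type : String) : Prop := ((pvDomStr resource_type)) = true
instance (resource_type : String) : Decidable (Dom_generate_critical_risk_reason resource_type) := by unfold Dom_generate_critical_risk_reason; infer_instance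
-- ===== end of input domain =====

-- B replaces A's six ordered substring searches by one left-to-right scan of the
-- lowered string that keeps the minimum priority of any keyword starting at each
-- position, then indexes a reason table (objective: alternative).

-- ===== PORT A =====
def generate_critical_risk_reason (resource_type : String) : String :=
  let resource_type_lower := PySem.Str.lower resource_type
  if PySem.Str.isIn "vpc" resource_type_lower then "Core networking infrastructure"
  else if PySem.Str.isIn "nat" resource_type_lower || PySem.Str.isIn "gateway" resource_type_lower then
    "Internet egress for private workloads"
  else if ["lb", "alb", "nlb", "elb"].any (fun x => PySem.Str.isIn x resource_type_lower) then
    "Traffic routing point"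
  else if PySem.Str.isIn "security_group" resource_type_lower || PySem.Str.isIn "firewall" resource_type_lower then
    "Access control enforcement"
  else if PySem.Str.isIn "db_instance" resource_type_lower || PySem.Str.isIn "database" resource_type_lower then
    "Data persistence - deletion causes data loss"
  else if PySem.Str.isIn "s3_bucket" resource_type_lower then
    "Object storage - deletion causes data loss"
  else "Critical infrastructure component"

-- ===== PORT B =====
-- KEYWORD_PRIORITY as an association list (insertion order), keywords as char lists.
def pvKeywordPriority : List (List Char × Nat) :=
  [("vpc".toList, 0), ("nat".toList, 1), ("gateway".toList, 1), ("lb".toList, 2),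
   ("security_group".toList, 3), ("firewall".toList, 3), ("db_instance".toList, 4),
   ("database".toList, 4), ("s3_bucket".toList, 5)]

def pvReasons : List String :=
  ["Core networking infrastructure",
   "Internet egress for private workloads",
   "Traffic routing point",
   "Access control enforcement",
   "Data persistence - deletion causes data loss",
   "Object storage - deletion causes data loss",
   "Critical infrastructure component"]

-- the inner `for k, p in KEYWORD_PRIORITY.items(): if p < best and s.startswith(k)`
def pvStep (t : List Char) (b : Nat) : Nat :=
  pvKeywordPriority.foldl (fun a kp => if kp.2 < a && kp.1.isPrefixOf t then kp.2 else a) b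

-- the outer `while s: ...; s = s[1:]` walking the suffixes
def pvBestFrom : List Char → Nat → Nat
  | [], b => b
  | c :: rest, b => pvBestFrom rest (pvStep (c :: rest) b)

def generate_critical_risk_reason_alt (resource_type : String) : String :=
  pvReasons.getD (pvBestFrom (PySem.Str.lower resource_type).toList 6) ""

-- ===== PRECONDITION & SPEC =====
def Spec_generate_critical_risk_reason (resource_type : String) (out : String) : Prop := out = generate_critical_risk_reason_alt resource_type
instance (resource_type : String) (out : String) : Decidable (Spec_generate_critical_risk_reason resource_type out) := by unfold Spec_generate_critical_risk_reason; infer_instance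

-- ===== CLAIM (what is proved, stated in full; the proofs are below) =====
def Claim_equal_generate_critical_risk_reason : Prop := ∀ (resource_type : String), Dom_generate_critical_risk_reason resource_type → Spec_generate_critical_risk_reason resource_type (generate_critical_risk_reason resource_type)

-- ===== LEMMAS AND PROOFS =====

-- the priorities selected by a predicate on the keywords
def pvSel (pred : List Char → Bool) (L : List (List Char × Nat)) : List Nat :=
  L.filterMap (fun kp => if pred kp.1 then some kp.2 else none)

theorem pvSel_cons_true {pred : List Char → Bool} {kp : List Char × Nat}
    {L : List (List Char × Nat)} (h : pred kp.1 = true) :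
    pvSel pred (kp :: L) = kp.2 :: pvSel pred L := by
  simp [pvSel, h]

theorem pvSel_cons_false {pred : List Char → Bool} {kp : List Char × Nat}
    {L : List (List Char × Nat)} (h : pred kp.1 = false) :
    pvSel pred (kp :: L) = pvSel pred L := by
  simp [pvSel, h]

theorem pvFoldlMinLe : ∀ (l : List Nat) (b : Nat), l.foldl min b ≤ b := by
  intro l
  induction l with
  | nil => intro b; exact le_refl b
  | cons x l ih =>
      intro b
      calc (x :: l).foldl min b = l.foldl min (min b x) := rfl
        _ ≤ min b x := ih _
        _ ≤ b := min_le_left _ _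

theorem pvFoldlMinInit : ∀ (l : List Nat) (a b : Nat), l.foldl min (min a b) = min a (l.foldl min b) := by
  intro l
  induction l with
  | nil => intro a b; rfl
  | cons x l ih =>
      intro a b
      show l.foldl min (min (min a b) x) = min a (l.foldl min (min b x))
      rw [min_assoc, ih]

theorem pvStepEq (pred : List Char → Bool) :
    ∀ (L : List (List Char × Nat)) (b : Nat),
      L.foldl (fun a kp => if kp.2 < a && pred kp.1 then kp.2 else a) b
        = (pvSel pred L).foldl min b := by
  intro L
  induction L with
  | nil => intro b; rfl
  | cons kp L ih =>
      intro b
      rw [List.foldl_cons]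
      cases h : pred kp.1 with
      | false =>
          rw [pvSel_cons_false h]
          have hinit : (if kp.2 < b && false then kp.2 else b) = b := by simp
          rw [hinit]; exact ih b
      | true =>
          rw [pvSel_cons_true h, List.foldl_cons]
          have hinit : (if kp.2 < b && true then kp.2 else b) = min b kp.2 := by
            by_cases h' : kp.2 < b <;> simp [h', Nat.min_def]
          rw [hinit]; exact ih _

theorem pvMergeFold (q r qr : List Char → Bool) :
    ∀ (L : List (List Char × Nat)),
      (∀ kp ∈ L, qr kp.1 = (q kp.1 || r kp.1)) →
      ∀ b, (pvSel qr L).foldl min b = (pvSel r L).foldl min ((pvSel q L).foldl min b) := by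
  intro L
  induction L with
  | nil => intro _ b; rfl
  | cons kp L ih =>
      intro h b
      have hkp := h kp (List.mem_cons_self ..)
      have hrest : ∀ kp' ∈ L, qr kp'.1 = (q kp'.1 || r kp'.1) :=
        fun kp' hm => h kp' (List.mem_cons_of_mem _ hm)
      cases hq : q kp.1 <;> cases hr : r kp.1 <;> rw [hq, hr] at hkp <;> simp at hkp
      · -- both false
        rw [pvSel_cons_false hkp, pvSel_cons_false hq, pvSel_cons_false hr]
        exact ih hrest b
      · -- q false, r true
        rw [pvSel_cons_true hkp, pvSel_cons_false hq, pvSel_cons_true hr,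
          List.foldl_cons, List.foldl_cons, ih hrest (min b kp.2)]
        congr 1
        rw [min_comm b kp.2, pvFoldlMinInit]
        exact min_comm _ _
      · -- q true, r false
        rw [pvSel_cons_true hkp, pvSel_cons_true hq, pvSel_cons_false hr,
          List.foldl_cons, List.foldl_cons]
        exact ih hrest (min b kp.2)
      · -- both true
        rw [pvSel_cons_true hkp, pvSel_cons_true hq, pvSel_cons_true hr,
          List.foldl_cons, List.foldl_cons, List.foldl_cons, ih hrest (min b kp.2)]
        congr 1
        exact (min_eq_left (le_trans (pvFoldlMinLe _ _) (min_le_right b kp.2))).symm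

theorem pvIsInCons (k : List Char) (c : Char) (rest : List Char) :
    PySem.Chars.isIn k (c :: rest) = (k.isPrefixOf (c :: rest) || PySem.Chars.isIn k rest) := by
  rw [Bool.eq_iff_iff]
  simp only [Bool.or_eq_true, PySem.Chars.isIn_iff_infix, List.isPrefixOf_iff_prefix]
  exact List.infix_cons_iff

theorem pvBestChar : ∀ (s : List Char) (b : Nat),
    pvBestFrom s b
      = pvKeywordPriority.foldl
          (fun a kp => if kp.2 < a && PySem.Chars.isIn kp.1 s then kp.2 else a) b := by
  intro s
  induction s with
  | nil =>
      intro b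
      have hfalse : ∀ k : List Char, k ≠ [] → PySem.Chars.isIn k [] = false :=
        fun k hk => (PySem.Chars.isIn_eq_false_iff _ _).mpr (fun hinf => hk (List.eq_nil_of_infix_nil hinf))
      show b = _
      simp [pvKeywordPriority, hfalse]
  | cons c rest ih =>
      intro b
      calc pvBestFrom (c :: rest) b
          = pvBestFrom rest (pvStep (c :: rest) b) := rfl
        _ = pvKeywordPriority.foldl
              (fun a kp => if kp.2 < a && PySem.Chars.isIn kp.1 rest then kp.2 else a)
              (pvStep (c :: rest) b) := ih _
        _ = (pvSel (fun k => PySem.Chars.isIn k rest) pvKeywordPriority).foldl min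
              (pvStep (c :: rest) b) :=
            pvStepEq (fun k => PySem.Chars.isIn k rest) pvKeywordPriority _
        _ = (pvSel (fun k => PySem.Chars.isIn k rest) pvKeywordPriority).foldl min
              ((pvSel (fun k => k.isPrefixOf (c :: rest)) pvKeywordPriority).foldl min b) :=
            congrArg (fun x => (pvSel (fun k => PySem.Chars.isIn k rest) pvKeywordPriority).foldl min x)
              (pvStepEq (fun k => k.isPrefixOf (c :: rest)) pvKeywordPriority b)
        _ = (pvSel (fun k => PySem.Chars.isIn k (c :: rest)) pvKeywordPriority).foldl min b :=
            (pvMergeFold (fun k => k.isPrefixOf (c :: rest)) (fun k => PySem.Chars.isIn k rest)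
              (fun k => PySem.Chars.isIn k (c :: rest)) pvKeywordPriority
              (fun kp _ => pvIsInCons kp.1 c rest) b).symm
        _ = pvKeywordPriority.foldl
              (fun a kp => if kp.2 < a && PySem.Chars.isIn kp.1 (c :: rest) then kp.2 else a) b :=
            (pvStepEq (fun k => PySem.Chars.isIn k (c :: rest)) pvKeywordPriority b).symm

theorem pvFoldLadder : ∀ (cv cn cg cl cs cf cd cdb c3 : Bool),
    List.foldl (fun a bp => if bp.2 < a && bp.1 then bp.2 else a) 6
      [(cv, (0 : Nat)), (cn, 1), (cg, 1), (cl, 2), (cs, 3), (cf, 3), (cd, 4), (cdb, 4), (c3, 5)]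
    = (if cv then 0 else if cn || cg then 1 else if cl then 2
       else if cs || cf then 3 else if cd || cdb then 4 else if c3 then 5 else 6) := by
  decide

set_option maxHeartbeats 1600000 in
theorem pvBestLadder (s : List Char) :
    pvBestFrom s 6
      = (if PySem.Chars.isIn "vpc".toList s then (0 : Nat)
         else if PySem.Chars.isIn "nat".toList s || PySem.Chars.isIn "gateway".toList s then 1
         else if PySem.Chars.isIn "lb".toList s then 2
         else if PySem.Chars.isIn "security_group".toList s || PySem.Chars.isIn "firewall".toList s then 3
         else if PySem.Chars.isIn "db_instance".toList s || PySem.Chars.isIn "database".toList s then 4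
         else if PySem.Chars.isIn "s3_bucket".toList s then 5 else 6) := by
  rw [pvBestChar]
  exact pvFoldLadder (PySem.Chars.isIn "vpc".toList s) (PySem.Chars.isIn "nat".toList s)
    (PySem.Chars.isIn "gateway".toList s) (PySem.Chars.isIn "lb".toList s)
    (PySem.Chars.isIn "security_group".toList s) (PySem.Chars.isIn "firewall".toList s)
    (PySem.Chars.isIn "db_instance".toList s) (PySem.Chars.isIn "database".toList s)
    (PySem.Chars.isIn "s3_bucket".toList s)

-- ===== VERDICT (by name: the statement is the Claim_ definition above) =====
set_option maxHeartbeats 1600000 in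
theorem generate_critical_risk_reason_spec : Claim_equal_generate_critical_risk_reason := by
  intro rt _
  unfold Spec_generate_critical_risk_reason generate_critical_risk_reason
    generate_critical_risk_reason_alt
  rw [pvBestLadder]
  have htrans : ∀ (a : List Char), "lb".toList <:+: a →
      PySem.Chars.isIn a ((PySem.Str.lower rt).toList) = true →
      PySem.Chars.isIn "lb".toList ((PySem.Str.lower rt).toList) = true := by
    intro a hsub h
    exact (PySem.Chars.isIn_iff_infix _ _).mpr (hsub.trans ((PySem.Chars.isIn_iff_infix _ _).mp h))
  have h1 := htrans "alb".toList (by decide)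
  have h2 := htrans "nlb".toList (by decide)
  have h3 := htrans "elb".toList (by decide)
  simp only [List.any_cons, List.any_nil, Bool.or_false, PySem.Str.isIn_eq]
  split_ifs <;> simp_all [pvReasons]
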